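-- pv_equiv track=rewrite | github.com/vbshubham/LC | uniqueGoodSubsequence.py | count_unique_subsequences
-- ===== SOURCE A (Python) =====
-- def count_unique_subsequences(s):
--     """Returns the number of unique subsequences of the sequence s"""
--     L = {}
--     N = []
--     count = 1
--     for c in s:
--         N.append(count)
--         count *= 2
--         if c in L:
--             count -= N[L[c] - 1]
--         L[c] = len(N)
--     return count - 1
-- ===== SOURCE B (Python) =====
-- def count_unique_subsequences(s):
--     """Returns the number of unique subsequences of the sequence s"""
--     ends = {}
--     for c in s:
--         ends[c] = sum(ends.values()) + 1
--     return sum(ends.values())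
-- ===== Notes on version B (the rewrite author's own statement) =====
-- stated objective: simpler
-- what changed: B replaces A's running doubled count with explicit subtraction of remembered per-step counts (dict of indices plus a growing list N) by a single dict mapping each character to the number of distinct subsequences ending in it, recomputing the value sum at each step and returning the final sum.
import Mathlib
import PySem

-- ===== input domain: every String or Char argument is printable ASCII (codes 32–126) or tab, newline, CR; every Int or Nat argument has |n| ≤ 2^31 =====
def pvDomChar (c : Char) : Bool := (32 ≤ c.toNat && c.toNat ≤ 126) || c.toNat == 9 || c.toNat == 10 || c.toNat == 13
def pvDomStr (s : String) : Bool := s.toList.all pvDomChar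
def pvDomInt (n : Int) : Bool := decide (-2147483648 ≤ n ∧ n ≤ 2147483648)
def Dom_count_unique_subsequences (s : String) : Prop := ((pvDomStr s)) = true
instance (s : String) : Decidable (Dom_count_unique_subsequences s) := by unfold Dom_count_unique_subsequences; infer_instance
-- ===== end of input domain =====

-- B replaces A's doubled running count with per-ending-character counts summed from a dict; objective: simpler.

-- ===== PORT A =====
-- state: (L, N, count) as in A
def pvStepA (st : PySem.Dict Char Int × List Int × Int) (c : Char) :
    PySem.Dict Char Int × List Int × Int :=
  let N := st.2.1 ++ [st.2.2]
  let count := st.2.2 * 2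
  let count :=
    match st.1.get? c with          -- 'if c in L: count -= N[L[c] - 1]'
    | some i => count - PySem.List.pyGetD N (i - 1) 0   -- index always in range (i = earlier len(N) ≥ 1)
    | none => count
  (st.1.insert c (N.length : Int), N, count)

def count_unique_subsequences (s : String) : Int :=
  (s.toList.foldl pvStepA (PySem.Dict.empty, [], 1)).2.2 - 1

-- ===== PORT B =====
def pvStepB (d : PySem.Dict Char Int) (c : Char) : PySem.Dict Char Int :=
  d.insert c (d.values.sum + 1)     -- ends[c] = sum(ends.values()) + 1

def count_unique_subsequences_alt (s : String) : Int :=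
  (s.toList.foldl pvStepB PySem.Dict.empty).values.sum

-- ===== PRECONDITION & SPEC =====
def Spec_count_unique_subsequences (s : String) (out : Int) : Prop := out = count_unique_subsequences_alt s
instance (s : String) (out : Int) : Decidable (Spec_count_unique_subsequences s out) := by unfold Spec_count_unique_subsequences; infer_instance

-- ===== CLAIM (what is proved, stated in full; the proofs are below) =====
def Claim_equal_count_unique_subsequences : Prop := ∀ (s : String), Dom_count_unique_subsequences s → Spec_count_unique_subsequences s (count_unique_subsequences s)

-- ===== LEMMAS AND PROOFS =====

-- sum of snd after replacing the (unique) entry keyed k by (k, v)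
lemma pv_sum_map_snd_replace (l : List (Char × Int)) (k : Char) (v o : Int)
    (hnd : (l.map (·.1)).Nodup) (ho : (k, o) ∈ l) :
    ((l.map (fun p => if p.1 == k then (k, v) else p)).map (·.2)).sum
      = (l.map (·.2)).sum + v - o := by
  induction l with
  | nil => cases ho
  | cons p t ih =>
    simp only [List.map_cons, List.nodup_cons] at hnd
    by_cases hpk : p.1 = k
    · subst hpk
      have hpo : p.2 = o := by
        rcases List.mem_cons.mp ho with h | h
        · rw [← h]
        · exact absurd (List.mem_map_of_mem (f := (·.1)) h) hnd.1
      have ht : t.map (fun q => if q.1 == p.1 then (p.1, v) else q) = t := by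
        refine (List.map_congr_left ?_).trans t.map_id
        intro q hq
        have hne : q.1 ≠ p.1 := fun h => hnd.1 (h ▸ List.mem_map_of_mem (f := (·.1)) hq)
        simp [hne]
      simp only [List.map_cons, List.sum_cons, beq_self_eq_true, if_true, ht]
      omega
    · have ho' : (k, o) ∈ t := by
        rcases List.mem_cons.mp ho with h | h
        · exact absurd (by rw [← h]) hpk
        · exact h
      have hsum := ih hnd.2 ho'
      have hif : (if p.1 == k then (k, v) else p) = p := by simp [hpk]
      simp only [List.map_cons, hif, List.sum_cons]
      omega

-- sum of values after an insert, uniformly via getD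
lemma pv_sum_values_insert (d : PySem.Dict Char Int) (hnd : d.keys.Nodup) (k : Char) (v : Int) :
    (d.insert k v).values.sum = d.values.sum + v - d.getD k 0 := by
  by_cases hc : d.contains k = true
  · obtain ⟨o, ho⟩ : ∃ o, d.get? k = some o := by
      have h := PySem.Dict.contains_eq_isSome_get? d k
      rw [hc] at h
      exact Option.isSome_iff_exists.mp h.symm
    have hmem : (k, o) ∈ d.items := PySem.Dict.mem_items_of_get?_eq_some d ho
    have hgD : d.getD k 0 = o := PySem.Dict.getD_of_get?_eq_some d 0 ho
    show ((d.insert k v).items.map (·.2)).sum = _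
    rw [PySem.Dict.items_insert_of_contains d v hc, hgD]
    exact pv_sum_map_snd_replace d.items k v o hnd hmem
  · have hc' : d.contains k = false := by simpa using hc
    have hgD : d.getD k 0 = 0 := PySem.Dict.getD_of_not_contains d 0 hc'
    show ((d.insert k v).items.map (·.2)).sum = _
    rw [PySem.Dict.items_insert_of_not_contains d v hc', hgD]
    simp [PySem.Dict.values]

-- main correspondence between A's loop state and B's dict
lemma pv_main (cs : List Char) (L : PySem.Dict Char Int) (N : List Int) (count : Int)
    (d : PySem.Dict Char Int)
    (h1 : count = d.values.sum + 1)
    (h2 : d.keys.Nodup)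
    (h3 : ∀ c, (L.get? c).isSome = (d.get? c).isSome)
    (h4 : ∀ c i, L.get? c = some i → ∃ v, d.get? c = some v ∧ 1 ≤ i ∧ i ≤ (N.length : Int) ∧
            PySem.List.pyGetD N (i - 1) 0 = v) :
    (cs.foldl pvStepA (L, N, count)).2.2 = (cs.foldl pvStepB d).values.sum + 1 := by
  induction cs generalizing L N count d with
  | nil => simpa using h1
  | cons c rest ih =>
    simp only [List.foldl_cons]
    have hsum : (pvStepB d c).values.sum = d.values.sum + (d.values.sum + 1) - d.getD c 0 :=
      pv_sum_values_insert d h2 c (d.values.sum + 1)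
    apply ih
    · -- h1 for next state
      rw [hsum]
      show (match L.get? c with
            | some i => count * 2 - PySem.List.pyGetD (N ++ [count]) (i - 1) 0
            | none => count * 2) = _
      cases hL : L.get? c with
      | none =>
        have hd : d.get? c = none := by
          have h := h3 c; rw [hL] at h
          exact Option.not_isSome_iff_eq_none.mp (by simp [← h])
        have hz : d.getD c 0 = 0 := PySem.Dict.getD_of_get?_eq_none d 0 hd
        show count * 2 = d.values.sum + (d.values.sum + 1) - d.getD c 0 + 1
        rw [hz, h1]; ring
      | some i =>
        obtain ⟨v, hv, hi1, hi2, hNv⟩ := h4 c i hL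
        have hgv : d.getD c 0 = v := PySem.Dict.getD_of_get?_eq_some d 0 hv
        have hNv' : PySem.List.pyGetD (N ++ [count]) (i - 1) 0 = v := by
          rw [PySem.List.pyGetD_eq_getElem (N ++ [count]) 0 (by omega) (by simp; omega)]
          rw [PySem.List.pyGetD_eq_getElem N 0 (by omega) (by omega)] at hNv
          rw [List.getElem_append_left (by omega : (i - 1).toNat < N.length)]
          exact hNv
        show count * 2 - PySem.List.pyGetD (N ++ [count]) (i - 1) 0
          = d.values.sum + (d.values.sum + 1) - d.getD c 0 + 1
        rw [hNv', hgv, h1]; ring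
    · -- h2
      exact PySem.Dict.nodup_keys_insert d c _ h2
    · -- h3
      intro c'
      show ((L.insert c ((N ++ [count]).length : Int)).get? c').isSome = ((pvStepB d c).get? c').isSome
      by_cases hcc : c' = c
      · subst hcc
        rw [PySem.Dict.get?_insert_self, pvStepB, PySem.Dict.get?_insert_self]
        rfl
      · rw [PySem.Dict.get?_insert_of_ne L _ hcc, pvStepB, PySem.Dict.get?_insert_of_ne d _ hcc]
        exact h3 c'
    · -- h4
      intro c' i hgi
      change (L.insert c ((N ++ [count]).length : Int)).get? c' = some i at hgi
      by_cases hcc : c' = c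
      · subst hcc
        rw [PySem.Dict.get?_insert_self] at hgi
        have hi : i = ((N ++ [count]).length : Int) := by
          have := hgi.symm
          simpa using this
        refine ⟨d.values.sum + 1, ?_, by simp [hi], by simp [hi], ?_⟩
        · rw [pvStepB, PySem.Dict.get?_insert_self]
        · have hlen : ((N ++ [count]).length : Int) = (N.length : Int) + 1 := by simp
          rw [hi, hlen]
          have h01 : (N.length : Int) + 1 - 1 = (N.length : Int) := by ring
          rw [h01,
            PySem.List.pyGetD_eq_getElem (N ++ [count]) 0 (by positivity) (by simp)]
          simp [h1]
      · rw [PySem.Dict.get?_insert_of_ne L _ hcc] at hgi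
        obtain ⟨v, hv, hi1, hi2, hNv⟩ := h4 c' i hgi
        refine ⟨v, ?_, hi1, by simp; omega, ?_⟩
        · rw [pvStepB, PySem.Dict.get?_insert_of_ne d _ hcc]; exact hv
        · rw [PySem.List.pyGetD_eq_getElem (N ++ [count]) 0 (by omega) (by simp; omega)]
          rw [PySem.List.pyGetD_eq_getElem N 0 (by omega) (by omega)] at hNv
          rw [List.getElem_append_left (by omega : (i - 1).toNat < N.length)]
          exact hNv

-- ===== VERDICT (by name: the statement is the Claim_ definition above) =====
theorem count_unique_subsequences_spec : Claim_equal_count_unique_subsequences := by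
  intro s _
  show count_unique_subsequences s = count_unique_subsequences_alt s
  unfold count_unique_subsequences count_unique_subsequences_alt
  have h := pv_main s.toList PySem.Dict.empty [] 1 PySem.Dict.empty
    (by simp [PySem.Dict.values, PySem.Dict.empty])
    (by simp [PySem.Dict.keys, PySem.Dict.empty])
    (by intro c; simp [PySem.Dict.get?_empty])
    (by intro c i h; rw [PySem.Dict.get?_empty] at h; cases h)
  omega
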